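-- pv_equiv track=rewrite | github.com/JeriH26/Python_JAVA_Business_Simulation | training/python/basic_syntax_practice/python_basics_extra_solutions.py | count_inclusive
-- ===== SOURCE A (Python) =====
-- def count_inclusive(nums, left, right):
--     """Handle off-by-one correctly for inclusive boundaries [left, right]."""
--     if left > right:
--         return 0
--
--     count = 0
--     i = left
--     while i <= right and i < len(nums):
--         count += 1
--         i += 1
--     return count
-- ===== SOURCE B (Python) =====
-- def count_inclusive(nums, left, right):
--     """Closed-form count of indices i with left <= i <= right and i < len(nums)."""
--     return max(0, min(right, len(nums) - 1) - left + 1)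
-- ===== Notes on version B (the rewrite author's own statement) =====
-- stated objective: faster
-- what changed: Replaced the while-loop that counts i from left up to min(right, len-1) with the closed-form max(0, min(right, len(nums)-1) - left + 1).
import Mathlib
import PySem

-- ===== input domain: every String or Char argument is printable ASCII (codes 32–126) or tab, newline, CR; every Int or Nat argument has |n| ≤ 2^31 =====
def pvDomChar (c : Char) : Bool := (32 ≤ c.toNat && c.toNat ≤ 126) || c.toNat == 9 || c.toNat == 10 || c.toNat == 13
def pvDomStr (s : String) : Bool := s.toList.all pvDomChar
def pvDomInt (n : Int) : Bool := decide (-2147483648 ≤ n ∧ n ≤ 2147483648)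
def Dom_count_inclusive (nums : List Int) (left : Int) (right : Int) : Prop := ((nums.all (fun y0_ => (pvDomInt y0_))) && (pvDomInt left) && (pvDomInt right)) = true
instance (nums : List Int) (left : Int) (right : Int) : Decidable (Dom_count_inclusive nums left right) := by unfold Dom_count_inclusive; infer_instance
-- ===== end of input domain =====

-- B replaces A's counting while-loop by the closed form max(0, min(right, len-1) - left + 1): O(1) instead of O(right-left).

-- ===== PORT A =====
-- the while loop: while i <= right and i < len(nums): count += 1; i += 1
def countLoopA (n : Int) (right : Int) (i : Int) (count : Int) : Int :=
  if i ≤ right ∧ i < n then countLoopA n right (i + 1) (count + 1) else count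
termination_by (right + 1 - i).toNat
decreasing_by omega

def count_inclusive (nums : List Int) (left : Int) (right : Int) : Int :=
  if left > right then 0
  else countLoopA (nums.length : Int) right left 0

-- ===== PORT B =====
def count_inclusive_alt (nums : List Int) (left : Int) (right : Int) : Int :=
  max 0 (min right ((nums.length : Int) - 1) - left + 1)

-- ===== PRECONDITION & SPEC =====
def Spec_count_inclusive (nums : List Int) (left : Int) (right : Int) (out : Int) : Prop := out = count_inclusive_alt nums left right
instance (nums : List Int) (left : Int) (right : Int) (out : Int) : Decidable (Spec_count_inclusive nums left right out) := by unfold Spec_count_inclusive; infer_instance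

-- ===== CLAIM (what is proved, stated in full; the proofs are below) =====
def Claim_equal_count_inclusive : Prop := ∀ (nums : List Int) (left : Int) (right : Int), Dom_count_inclusive nums left right → Spec_count_inclusive nums left right (count_inclusive nums left right)

-- ===== LEMMAS AND PROOFS =====
theorem countLoopA_eq (n right : Int) :
    ∀ (k : Nat) (i count : Int), (right + 1 - i).toNat ≤ k →
      countLoopA n right i count = count + max 0 (min right (n - 1) - i + 1) := by
  intro k
  induction k with
  | zero =>
    intro i count h
    rw [countLoopA]
    have hi : right < i := by omega
    rw [if_neg (by omega)]
    omega
  | succ m ih =>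
    intro i count h
    rw [countLoopA]
    by_cases hc : i ≤ right ∧ i < n
    · rw [if_pos hc]
      rw [ih (i + 1) (count + 1) (by omega)]
      omega
    · rw [if_neg hc]
      omega

-- ===== VERDICT (by name: the statement is the Claim_ definition above) =====
theorem count_inclusive_spec : Claim_equal_count_inclusive := by
  intro nums left right _
  unfold Spec_count_inclusive count_inclusive count_inclusive_alt
  by_cases h : left > right
  · rw [if_pos h]; omega
  · rw [if_neg h]
    rw [countLoopA_eq (nums.length : Int) right (right + 1 - left).toNat left 0 le_rfl]
    omega
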